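-- pv_equiv track=rewrite | github.com/mohamed-elfiky/Networks | helperfn.py | alter
-- ===== SOURCE A (Python) =====
-- def xor(a, b):
--     result = []
--     for i in range(1, len(b)):
--         if a[i] == b[i]:
--             result.append('0')
--         else:
--             result.append('1')
--
--     return ''.join(result)
--
-- def alter(str_, argu_):
--     operand2 = []
--     for i in range(len(str_)):
--         if(i == argu_ - 1):
--             operand2.append("1")
--         else:
--             operand2.append("0")
--     str2_ = "".join(operand2)
--     return xor(str_, str2_)
-- ===== SOURCE B (Python) =====
-- def alter(str_, argu_):
--     out = []
--     for i in range(1, len(str_)):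
--         mask_char = '1' if i == argu_ - 1 else '0'
--         out.append('0' if str_[i] == mask_char else '1')
--     return ''.join(out)
-- ===== Notes on version B (the rewrite author's own statement) =====
-- stated objective: simpler
-- what changed: B drops the xor helper and the materialised one-hot mask string: a single loop over indices 1..len-1 computes the mask character on the fly and emits the xor bit directly, instead of A's two passes (build mask list, join, then xor two strings).
import Mathlib
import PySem

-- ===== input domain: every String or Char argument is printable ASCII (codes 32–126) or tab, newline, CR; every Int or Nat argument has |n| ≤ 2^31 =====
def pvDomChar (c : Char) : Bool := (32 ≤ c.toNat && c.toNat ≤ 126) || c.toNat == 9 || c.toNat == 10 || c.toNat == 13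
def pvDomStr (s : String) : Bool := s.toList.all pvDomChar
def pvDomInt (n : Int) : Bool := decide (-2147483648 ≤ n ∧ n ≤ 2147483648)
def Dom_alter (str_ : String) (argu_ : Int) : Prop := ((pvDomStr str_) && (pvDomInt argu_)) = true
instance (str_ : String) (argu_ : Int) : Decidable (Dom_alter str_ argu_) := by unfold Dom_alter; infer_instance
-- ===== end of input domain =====

-- B fuses A's two passes (build one-hot mask string, then xor) into one direct loop with no helper
-- and no intermediate mask string; objective: simpler. Both functions are total.

-- ===== PORT A =====
-- helper xor(a, b): loops i over range(1, len(b)); at the call site len a = len b, so a[i]/b[i]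
-- never raise and pyGetD's default ' ' is never used (exact on every reachable index).
def pvXor (a b : List Char) : List Char :=
  (PySem.List.pyRange 1 (b.length : Int) 1).foldl
    (fun res i =>
      res ++ [if PySem.List.pyGetD a i ' ' = PySem.List.pyGetD b i ' ' then '0' else '1']) []

def alter (str_ : String) (argu_ : Int) : String :=
  let s := str_.toList
  let operand2 := (PySem.List.pyRange 0 (s.length : Int) 1).foldl
    (fun acc i => acc ++ [if i = argu_ - 1 then '1' else '0']) []
  String.mk (pvXor s operand2)

-- ===== PORT B =====
def alter_alt (str_ : String) (argu_ : Int) : String :=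
  let s := str_.toList
  String.mk ((PySem.List.pyRange 1 (s.length : Int) 1).foldl
    (fun acc i =>
      let maskChar := if i = argu_ - 1 then '1' else '0'
      acc ++ [if PySem.List.pyGetD s i ' ' = maskChar then '0' else '1']) [])

-- ===== PRECONDITION & SPEC =====
def Spec_alter (str_ : String) (argu_ : Int) (out : String) : Prop := out = alter_alt str_ argu_
instance (str_ : String) (argu_ : Int) (out : String) : Decidable (Spec_alter str_ argu_ out) := by unfold Spec_alter; infer_instance

-- ===== CLAIM (what is proved, stated in full; the proofs are below) =====
def Claim_equal_alter : Prop := ∀ (str_ : String) (argu_ : Int), Dom_alter str_ argu_ → Spec_alter str_ argu_ (alter str_ argu_)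

-- ===== LEMMAS AND PROOFS =====

-- A's mask list is the map of the one-hot function over range(len s).
theorem alter_eq_alt (str_ : String) (argu_ : Int) : alter str_ argu_ = alter_alt str_ argu_ := by
  unfold alter alter_alt pvXor
  simp only [PySem.List.foldl_append_singleton_eq_map, List.nil_append]
  set s := str_.toList with hs
  have hlen : ((PySem.List.pyRange 0 (s.length : Int) 1).map
      (fun i => if i = argu_ - 1 then '1' else '0')).length = s.length := by
    simp [PySem.List.length_pyRange_one]
  rw [hlen]
  congr 1
  apply List.map_congr_left
  intro i hi
  rw [PySem.List.mem_pyRange_one] at hi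
  rw [PySem.List.pyGetD_map_pyRange_of_nonneg _ _ _ _ (by omega) (by omega)]

-- ===== VERDICT (by name: the statement is the Claim_ definition above) =====
theorem alter_spec : Claim_equal_alter := by
  intro str_ argu_ _
  exact alter_eq_alt str_ argu_
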